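-- pv_equiv track=rewrite | github.com/Makaadam11/Python | zestaw 5/fracs.py | sub_frac
-- ===== SOURCE A (Python) =====
-- import math
--
-- def sub_frac(fraction1, fraction2):
-- 	if (fraction1[1] & fraction2[1]) == 0:
-- 		raise ZeroDivisionError('dividing by zero error')
-- 	sub_result=[0, 0]
-- 	sub_result[0] = fraction1[0]*fraction2[1] - fraction2[0]*fraction1[1]
-- 	sub_result[1] = fraction1[1] * fraction2[1]
-- 	greatest_common_divisor = math.gcd(sub_result[0], sub_result[1])
-- 	return [x//greatest_common_divisor for x in sub_result]
-- ===== SOURCE B (Python) =====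
-- import math
--
-- def sub_frac(fraction1, fraction2):
--     n1, d1 = fraction1[0], fraction1[1]
--     n2, d2 = fraction2[0], fraction2[1]
--     if d1 == 0 or d2 == 0:
--         raise ZeroDivisionError('dividing by zero error')
--     g_d = math.gcd(d1, d2)
--     common = d1 * d2 // g_d
--     num = n1 * (common // d1) - n2 * (common // d2)
--     g = math.gcd(num, common)
--     return [num // g, common // g]
-- ===== Notes on version B (the rewrite author's own statement) =====
-- stated objective: alternative
-- what changed: B forms the difference over the least common multiple of the denominators (gcd of the denominators, then the two cofactors) instead of over their raw product, and tests the denominators for zero directly instead of A's bitwise-AND guard.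
-- crash fix: A raises ZeroDivisionError whenever the bitwise AND of the two denominators is 0 (e.g. denominators 2 and 5), even when both are nonzero; B returns the reduced difference there ([3,10] for ([1,2],[1,5])). — e.g. on sub_frac([1, 2], [1, 5]): A raises ZeroDivisionError, B returns [3, 10]
import Mathlib
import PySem

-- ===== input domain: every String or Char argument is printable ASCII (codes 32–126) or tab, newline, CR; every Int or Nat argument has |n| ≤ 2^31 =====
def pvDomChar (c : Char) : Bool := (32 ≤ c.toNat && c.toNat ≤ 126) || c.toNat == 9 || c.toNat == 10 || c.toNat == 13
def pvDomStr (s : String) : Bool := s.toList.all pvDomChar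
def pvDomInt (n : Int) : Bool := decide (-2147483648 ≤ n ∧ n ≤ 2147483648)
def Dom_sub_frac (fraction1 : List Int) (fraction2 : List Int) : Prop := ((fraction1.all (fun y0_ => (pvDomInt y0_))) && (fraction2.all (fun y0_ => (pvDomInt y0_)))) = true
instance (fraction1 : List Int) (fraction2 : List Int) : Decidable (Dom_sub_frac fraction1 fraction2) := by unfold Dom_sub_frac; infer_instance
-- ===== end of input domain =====

-- B subtracts over the lcm of the denominators (two gcds) instead of A's raw product,
-- and tests the denominators for zero directly instead of A's bitwise-AND guard (so B
-- returns where that guard spuriously raises); return values agree wherever A returns.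


-- ===== PORT A =====
def sub_frac (fraction1 : List Int) (fraction2 : List Int) : List Int :=
  match PySem.List.pyGet? fraction1 1, PySem.List.pyGet? fraction2 1 with
  | some d1, some d2 =>
    if PySem.Int.band d1 d2 == 0 then []   -- raise ZeroDivisionError (outside Pre_)
    else
      match PySem.List.pyGet? fraction1 0, PySem.List.pyGet? fraction2 0 with
      | some n1, some n2 =>
        let s0 := n1 * d2 - n2 * d1
        let s1 := d1 * d2
        let g : Int := Int.gcd s0 s1       -- math.gcd (nonnegative)
        ([s0, s1]).map (fun x => PySem.Int.floordiv x g)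
      | _, _ => []                          -- IndexError (outside Pre_)
  | _, _ => []                              -- IndexError (outside Pre_)

-- ===== PORT B =====
def sub_frac_alt (fraction1 : List Int) (fraction2 : List Int) : List Int :=
  (Option.bind (PySem.List.pyGet? fraction1 0) fun n1 =>
   Option.bind (PySem.List.pyGet? fraction1 1) fun d1 =>
   Option.bind (PySem.List.pyGet? fraction2 0) fun n2 =>
   Option.bind (PySem.List.pyGet? fraction2 1) fun d2 =>
   if d1 == 0 || d2 == 0 then none         -- raise ZeroDivisionError (outside Pre_)
   else
     let gd : Int := Int.gcd d1 d2
     let common := PySem.Int.floordiv (d1 * d2) gd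
     let num := n1 * PySem.Int.floordiv common d1 - n2 * PySem.Int.floordiv common d2
     let g : Int := Int.gcd num common
     some [PySem.Int.floordiv num g, PySem.Int.floordiv common g]).getD []
     -- .getD []: the none branches are IndexError / ZeroDivisionError, outside Pre_

-- ===== PRECONDITION & SPEC =====
-- Pre_ = exactly where A returns: both lists have the two entries A indexes, and A's
-- bitwise guard (fraction1[1] & fraction2[1]) != 0 passes (otherwise A raises).
def Pre_sub_frac (fraction1 : List Int) (fraction2 : List Int) : Prop :=
  2 ≤ fraction1.length ∧ 2 ≤ fraction2.length ∧
  PySem.Int.band (fraction1.getD 1 0) (fraction2.getD 1 0) ≠ 0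
instance (fraction1 : List Int) (fraction2 : List Int) : Decidable (Pre_sub_frac fraction1 fraction2) := by unfold Pre_sub_frac; infer_instance
def pvWitness_sub_frac : List Int × List Int := ([1, 2], [1, 2])

-- A raises ZeroDivisionError whenever the bitwise AND of the two (nonzero) denominators is 0,
-- e.g. denominators 2 and 5; B returns the reduced difference there.
def Raises_sub_frac (fraction1 : List Int) (fraction2 : List Int) : Prop :=
  2 ≤ fraction1.length ∧ 2 ≤ fraction2.length ∧
  fraction1.getD 1 0 ≠ 0 ∧ fraction2.getD 1 0 ≠ 0 ∧
  PySem.Int.band (fraction1.getD 1 0) (fraction2.getD 1 0) = 0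
instance (fraction1 : List Int) (fraction2 : List Int) : Decidable (Raises_sub_frac fraction1 fraction2) := by unfold Raises_sub_frac; infer_instance
def pvRaiseWitness_sub_frac : List Int × List Int := ([1, 2], [1, 5])
def pvRaiseWitnessOut_sub_frac : List Int := [3, 10]

def Spec_sub_frac (fraction1 : List Int) (fraction2 : List Int) (out : List Int) : Prop := out = sub_frac_alt fraction1 fraction2
instance (fraction1 : List Int) (fraction2 : List Int) (out : List Int) : Decidable (Spec_sub_frac fraction1 fraction2 out) := by unfold Spec_sub_frac; infer_instance

-- ===== CLAIM (what is proved, stated in full; the proofs are below) =====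
def Claim_equal_sub_frac : Prop := ∀ (fraction1 : List Int) (fraction2 : List Int), Dom_sub_frac fraction1 fraction2 → Pre_sub_frac fraction1 fraction2 → Spec_sub_frac fraction1 fraction2 (sub_frac fraction1 fraction2)
def Claim_raises_sub_frac : Prop := (∀ (fraction1 : List Int) (fraction2 : List Int), Dom_sub_frac fraction1 fraction2 → Raises_sub_frac fraction1 fraction2 → ¬ Pre_sub_frac fraction1 fraction2) ∧ (Dom_sub_frac (pvRaiseWitness_sub_frac.1) (pvRaiseWitness_sub_frac.2) ∧ Raises_sub_frac (pvRaiseWitness_sub_frac.1) (pvRaiseWitness_sub_frac.2) ∧ sub_frac_alt (pvRaiseWitness_sub_frac.1) (pvRaiseWitness_sub_frac.2) = pvRaiseWitnessOut_sub_frac)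

-- ===== LEMMAS AND PROOFS =====

-- exact floor division: if c * b = a (so b divides a) then floordiv a b is the exact quotient c
theorem floordiv_of_dvd {a b c : Int} (hb : b ≠ 0) (h : c * b = a) :
    PySem.Int.floordiv a b = c := by
  have hdvd : b ∣ a := Dvd.intro_left c h
  have hm : PySem.Int.mod a b = 0 := (PySem.Int.mod_eq_zero_iff_dvd a b).mpr hdvd
  have hfm := PySem.Int.floordiv_mul_add_mod a b
  rw [hm, add_zero] at hfm
  exact mul_right_cancel₀ hb (hfm.trans h.symm)

-- positive-factor cancellation in floor division
theorem floordiv_mul_cancel {k g : Int} (hk : 0 < k) (hg : 0 < g) (x : Int) :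
    PySem.Int.floordiv (k * x) (k * g) = PySem.Int.floordiv x g := by
  rw [PySem.Int.floordiv_eq_ediv_of_pos (mul_pos hk hg),
      PySem.Int.floordiv_eq_ediv_of_pos hg,
      Int.mul_ediv_mul_of_pos x g hk]

-- the core arithmetic fact: A's product-denominator reduction equals B's lcm reduction
theorem core (n1 d1 n2 d2 : Int) (h1 : d1 ≠ 0) (h2 : d2 ≠ 0) :
    [PySem.Int.floordiv (n1 * d2 - n2 * d1) ((n1 * d2 - n2 * d1).gcd (d1 * d2) : Int),
     PySem.Int.floordiv (d1 * d2) ((n1 * d2 - n2 * d1).gcd (d1 * d2) : Int)] =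
    [PySem.Int.floordiv
        (n1 * PySem.Int.floordiv (PySem.Int.floordiv (d1 * d2) (d1.gcd d2 : Int)) d1 -
          n2 * PySem.Int.floordiv (PySem.Int.floordiv (d1 * d2) (d1.gcd d2 : Int)) d2)
        (((n1 * PySem.Int.floordiv (PySem.Int.floordiv (d1 * d2) (d1.gcd d2 : Int)) d1 -
            n2 * PySem.Int.floordiv (PySem.Int.floordiv (d1 * d2) (d1.gcd d2 : Int)) d2).gcd
           (PySem.Int.floordiv (d1 * d2) (d1.gcd d2 : Int)) : Int)),
     PySem.Int.floordiv (PySem.Int.floordiv (d1 * d2) (d1.gcd d2 : Int))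
        (((n1 * PySem.Int.floordiv (PySem.Int.floordiv (d1 * d2) (d1.gcd d2 : Int)) d1 -
            n2 * PySem.Int.floordiv (PySem.Int.floordiv (d1 * d2) (d1.gcd d2 : Int)) d2).gcd
           (PySem.Int.floordiv (d1 * d2) (d1.gcd d2 : Int)) : Int))] := by
  set G : Int := (d1.gcd d2 : Int) with hGdef
  have hGpos : (0 : Int) < G := by
    rw [hGdef]; exact_mod_cast Int.gcd_pos_iff.mpr (Or.inl h1)
  have hGne : G ≠ 0 := ne_of_gt hGpos
  obtain ⟨a, ha⟩ : G ∣ d1 := by rw [hGdef]; exact Int.gcd_dvd_left d1 d2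
  obtain ⟨b, hb⟩ : G ∣ d2 := by rw [hGdef]; exact Int.gcd_dvd_right d1 d2
  have hbne : b ≠ 0 := fun h => h2 (by rw [hb, h, mul_zero])
  have hcommon : PySem.Int.floordiv (d1 * d2) G = d1 * b :=
    floordiv_of_dvd hGne (by rw [hb]; ring)
  have hq1 : PySem.Int.floordiv (d1 * b) d1 = b := floordiv_of_dvd h1 (by ring)
  have hq2 : PySem.Int.floordiv (d1 * b) d2 = a := floordiv_of_dvd h2 (by rw [ha, hb]; ring)
  rw [hcommon, hq1, hq2]
  have hs0 : n1 * d2 - n2 * d1 = G * (n1 * b - n2 * a) := by rw [ha, hb]; ring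
  have hs1 : d1 * d2 = G * (d1 * b) := by rw [hb]; ring
  rw [hs0, hs1, Int.gcd_mul_left]
  have hLne : d1 * b ≠ 0 := mul_ne_zero h1 hbne
  have hg'pos : (0 : Int) < ((n1 * b - n2 * a).gcd (d1 * b) : Int) := by
    exact_mod_cast Int.gcd_pos_iff.mpr (Or.inr hLne)
  have hcast : ((G.natAbs * (n1 * b - n2 * a).gcd (d1 * b) : Nat) : Int)
      = G * ((n1 * b - n2 * a).gcd (d1 * b) : Int) := by
    push_cast
    rw [abs_of_pos hGpos]
  rw [hcast, floordiv_mul_cancel hGpos hg'pos, floordiv_mul_cancel hGpos hg'pos]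

theorem pyGet?_cons2_zero (x y : Int) (t : List Int) :
    PySem.List.pyGet? (x :: y :: t) 0 = some x := by
  have h0 : (0 : Int) ≤ (t.length : Int) + 1 := by positivity
  simp [PySem.List.pyGet?, PySem.List.pyIdx?, h0]

theorem pyGet?_cons2_one (x y : Int) (t : List Int) :
    PySem.List.pyGet? (x :: y :: t) 1 = some y := by
  simp [PySem.List.pyGet?, PySem.List.pyIdx?]

-- ===== VERDICT (by name: the statement is the Claim_ definition above) =====
theorem sub_frac_spec : Claim_equal_sub_frac := by
  intro f1 f2 _ hpre
  obtain ⟨hl1, hl2, hband⟩ := hpre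
  match f1, hl1 with
  | n1 :: d1 :: t1, _ =>
  match f2, hl2 with
  | n2 :: d2 :: t2, _ =>
  have hb2 : PySem.Int.band d1 d2 ≠ 0 := by simpa using hband
  have hd1 : d1 ≠ 0 := fun h => hb2 (by rw [h, PySem.Int.band_comm, PySem.Int.band_zero])
  have hd2 : d2 ≠ 0 := fun h => hb2 (by rw [h, PySem.Int.band_zero])
  show sub_frac _ _ = sub_frac_alt _ _
  unfold sub_frac sub_frac_alt
  rw [pyGet?_cons2_zero n1 d1 t1, pyGet?_cons2_one n1 d1 t1,
      pyGet?_cons2_zero n2 d2 t2, pyGet?_cons2_one n2 d2 t2]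
  simp only [hb2, hd1, hd2, beq_iff_eq, if_false, Bool.or_eq_true, or_self, List.map, Option.bind_some, Option.getD_some]
  exact core n1 d1 n2 d2 hd1 hd2

def sub_frac_raises : Claim_raises_sub_frac := by
  unfold Claim_raises_sub_frac
  constructor
  · intro f1 f2 _ hr hp
    exact hp.2.2 hr.2.2.2.2
  · exact ⟨by decide, by decide, by decide⟩
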